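-- pv_equiv track=rewrite | github.com/imonoonoko/Tag-Manager | modules/ui_main.py | _extract_tags_from_prompt
-- ===== SOURCE A (Python) =====
-- from typing import Any, Dict, List, Optional, Callable, cast, Tuple
--
-- def _extract_tags_from_prompt(prompt_text: str) -> List[str]:
--     """プロンプトテキストからタグを抽出する"""
--     tags = []
--     lines = prompt_text.split('\n')
--     for line in lines:
--         line = line.strip()
--         if line:
--             # カンマ区切りでタグを分割
--             parts = [part.strip() for part in line.split(',')]
--             for part in parts:
--                 # 重み付けを除去（例: "tag (1.2)" -> "tag"）
--                 if '(' in part and ')' in part: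
--                     part = part.split('(')[0].strip()
--                 if part and len(part) > 0:
--                     tags.append(part)
--     return tags
-- ===== SOURCE B (Python) =====
-- from typing import List
--
-- def _extract_tags_from_prompt(prompt_text: str) -> List[str]:
--     """プロンプトテキストからタグを抽出する"""
--     tags = []
--     buf = []
--     for ch in prompt_text + ',':
--         if ch == ',' or ch == '\n':
--             token = ''.join(buf).strip()
--             buf = []
--             if '(' in token and ')' in token:
--                 token = token[:token.index('(')].strip()
--             if token:
--                 tags.append(token)
--         else:
--             buf.append(ch)
--     return tags
-- ===== Notes on version B (the rewrite author's own statement) =====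
-- stated objective: alternative
-- what changed: A's staged splitting (split the text into lines, strip each line, split each line on commas, strip each part) is replaced by a single character-level scanner: one pass over the characters with an explicit buffer accumulator that flushes a token at every comma or newline, with no split calls at all; each flushed token is stripped, cut before its first opening parenthesis when it contains both parentheses, and appended if nonempty.
import Mathlib
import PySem

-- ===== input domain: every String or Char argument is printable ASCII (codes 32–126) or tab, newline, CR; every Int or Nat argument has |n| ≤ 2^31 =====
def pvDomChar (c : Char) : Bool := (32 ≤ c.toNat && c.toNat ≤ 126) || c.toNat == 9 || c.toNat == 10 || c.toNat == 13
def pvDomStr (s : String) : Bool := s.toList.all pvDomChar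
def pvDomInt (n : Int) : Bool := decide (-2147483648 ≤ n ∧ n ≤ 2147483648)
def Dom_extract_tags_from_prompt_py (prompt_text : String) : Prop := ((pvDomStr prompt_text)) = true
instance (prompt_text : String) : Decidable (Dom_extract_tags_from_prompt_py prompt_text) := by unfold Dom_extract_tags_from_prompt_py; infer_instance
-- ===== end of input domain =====

-- B replaces A's staged splitting (split on '\n', strip, split on ',', strip) by a single
-- character-level scanner with an explicit buffer that flushes a token at each ',' or '\n'
-- (objective: alternative); return values proved equal on all inputs.

-- s.split(sep) for a NON-EMPTY separator: the some-branch of PySem.Str.split? (exact)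
def pySplitStr (s sep : String) : List String :=
  (PySem.Chars.splitOn s.toList sep.toList).map String.ofList

-- ===== PORT A =====
def extract_tags_from_prompt_py (prompt_text : String) : List String :=
  let lines := pySplitStr prompt_text "\n"
  lines.foldl (fun tags line₀ =>
    let line := PySem.Str.strip line₀
    if line ≠ "" then
      let parts := (pySplitStr line ",").map PySem.Str.strip
      parts.foldl (fun tags part₀ =>
        let part := if PySem.Str.isIn "(" part₀ && PySem.Str.isIn ")" part₀
                    then PySem.Str.strip (PySem.List.pyGetD (pySplitStr part₀ "(") 0 "")
                    else part₀
        if part ≠ "" ∧ PySem.Str.len part > 0 then tags ++ [part] else tags) tags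
    else tags) []

-- ===== PORT B =====
-- finalize of Source B's scanner: ''.join(buf).strip(), cut before the first '(' when both parens
-- occur (token[:token.index('(')] = the prefix before the first '(' = takeWhile (· ≠ '(')), keep if nonempty
def pvCut (token0 : List Char) : List Char :=
  if '(' ∈ token0 ∧ ')' ∈ token0
  then PySem.Chars.strip (token0.takeWhile (fun c => c ≠ '('))
  else token0

def pvFin (tags : List String) (buf : List Char) : List String :=
  if pvCut (PySem.Chars.strip buf) ≠ []
  then tags ++ [String.ofList (pvCut (PySem.Chars.strip buf))]
  else tags

def pvStep (st : List String × List Char) (ch : Char) : List String × List Char :=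
  if ch = ',' ∨ ch = '\n' then (pvFin st.1 st.2, []) else (st.1, st.2 ++ [ch])

def extract_tags_from_prompt_py_alt (prompt_text : String) : List String :=
  ((prompt_text ++ ",").toList.foldl pvStep ([], [])).1

-- ===== PRECONDITION & SPEC =====
def Spec_extract_tags_from_prompt_py (prompt_text : String) (out : List String) : Prop := out = extract_tags_from_prompt_py_alt prompt_text
instance (prompt_text : String) (out : List String) : Decidable (Spec_extract_tags_from_prompt_py prompt_text out) := by unfold Spec_extract_tags_from_prompt_py; infer_instance

-- ===== CLAIM (what is proved, stated in full; the proofs are below) =====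
def Claim_equal_extract_tags_from_prompt_py : Prop := ∀ (prompt_text : String), Dom_extract_tags_from_prompt_py prompt_text → Spec_extract_tags_from_prompt_py prompt_text (extract_tags_from_prompt_py prompt_text)

-- ===== LEMMAS AND PROOFS =====

def mySplit (c : Char) : List Char → List (List Char)
  | [] => [[]]
  | a :: t =>
    if a = c then [] :: mySplit c t
    else
      match mySplit c t with
      | [] => [[a]]
      | h :: r => (a :: h) :: r

theorem mySplit_ne_nil (c : Char) (l : List Char) : mySplit c l ≠ [] := by
  cases l with
  | nil => simp [mySplit]
  | cons a t =>
    simp only [mySplit]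
    split
    · simp
    · split <;> simp_all

theorem splitOn_go_single (c : Char) (fuel : Nat) :
    ∀ (l cur : List Char) (acc : List (List Char)), l.length < fuel →
    PySem.Chars.splitOn.go [c] fuel l cur acc
      = acc.reverse ++ (match mySplit c l with
          | [] => []
          | h :: r => (cur.reverse ++ h) :: r) := by
  induction fuel with
  | zero => intro l cur acc h; omega
  | succ fuel ih =>
    intro l cur acc h
    cases l with
    | nil =>
      rw [PySem.Chars.splitOn.go]
      simp [mySplit]
      omega
    | cons a t =>
      rw [PySem.Chars.splitOn.go]
      by_cases hac : a = c
      · subst hac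
        simp only [List.isPrefixOf, BEq.rfl, Bool.true_and, List.isPrefixOf_nil_left, if_true]
        rw [ih]
        · simp only [mySplit, if_pos rfl]
          rcases hh : mySplit a t with _ | ⟨h1, r⟩
          · exact absurd hh (mySplit_ne_nil a t)
          · simp [hh]
        · simp at h ⊢; omega
      · have : ([c].isPrefixOf (a :: t)) = false := by
          simp [List.isPrefixOf]; exact fun hc => absurd hc.symm hac
        rw [this]
        simp only [Bool.false_eq_true, if_false]
        rw [ih]
        · simp only [mySplit, if_neg hac]
          rcases hh : mySplit c t with _ | ⟨h1, r⟩
          · exact absurd hh (mySplit_ne_nil c t)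
          · simp [hh]
        · simp at h ⊢; omega

theorem splitOn_single (c : Char) (l : List Char) :
    PySem.Chars.splitOn l [c] = mySplit c l := by
  rw [PySem.Chars.splitOn, splitOn_go_single c (l.length+1) l [] [] (by omega)]
  rcases hh : mySplit c l with _ | ⟨h1, r⟩
  · exact absurd hh (mySplit_ne_nil c l)
  · simp [hh]

def nl2c (c : Char) : Char := if c = '\n' then ',' else c

theorem mySplit_map_nl (l : List Char) :
    mySplit ',' (l.map nl2c) = (mySplit '\n' l).flatMap (mySplit ',') := by
  induction l with
  | nil => simp [mySplit]
  | cons a t ih =>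
    by_cases ha : a = '\n'
    · subst ha
      have h0 : nl2c '\n' = ',' := by decide
      simp only [List.map_cons, h0, mySplit, if_pos rfl, List.flatMap_cons]
      rw [ih]
      simp [mySplit]
    · have hf : nl2c a = a := by simp [nl2c, ha]
      by_cases hc : a = ','
      · subst hc
        simp only [List.map_cons, hf, mySplit, if_pos rfl, if_neg ha]
        rw [ih]
        rcases hh : mySplit '\n' t with _ | ⟨h1, r⟩
        · exact absurd hh (mySplit_ne_nil _ t)
        · simp [hh, mySplit]
      · simp only [List.map_cons, hf, mySplit, if_neg ha, if_neg hc]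
        rw [ih]
        rcases hh : mySplit '\n' t with _ | ⟨h1, r⟩
        · exact absurd hh (mySplit_ne_nil _ t)
        · simp only [hh, List.flatMap_cons]
          rcases hg : mySplit ',' h1 with _ | ⟨g1, s⟩
          · exact absurd hg (mySplit_ne_nil _ h1)
          · simp [mySplit, if_neg hc, hg]

theorem strip_cons_space (a : Char) (ha : PySem.Chars.isspace a = true) (l : List Char) :
    PySem.Chars.strip (a :: l) = PySem.Chars.strip l := by
  simp [PySem.Chars.strip, PySem.Chars.lstrip, List.dropWhile_cons, ha]

theorem strip_snoc_space (a : Char) (ha : PySem.Chars.isspace a = true) (l : List Char) :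
    PySem.Chars.strip (l ++ [a]) = PySem.Chars.strip l := by
  simp only [PySem.Chars.strip, PySem.Chars.lstrip, PySem.Chars.rstrip, List.dropWhile_append]
  by_cases h : (List.dropWhile PySem.Chars.isspace l).isEmpty
  · simp [h, List.dropWhile_cons, ha, List.isEmpty_iff.mp h]
  · simp [h, List.dropWhile_cons, ha]

def snocLast (a : Char) : List (List Char) → List (List Char)
  | [] => [[a]]
  | [h] => [h ++ [a]]
  | h :: r => h :: snocLast a r

theorem mySplit_snoc (c a : Char) (hac : a ≠ c) (l : List Char) :
    mySplit c (l ++ [a]) = snocLast a (mySplit c l) := by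
  induction l with
  | nil => simp [mySplit, hac, snocLast]
  | cons b t ih =>
    by_cases hbc : b = c
    · subst hbc
      simp only [List.cons_append, mySplit, if_pos rfl]
      rw [ih]
      rcases hh : mySplit b t with _ | ⟨h1, r⟩
      · exact absurd hh (mySplit_ne_nil b t)
      · simp [snocLast]
    · simp only [List.cons_append, mySplit, if_neg hbc]
      rw [ih]
      rcases hh : mySplit c t with _ | ⟨h1, r⟩
      · exact absurd hh (mySplit_ne_nil c t)
      · rcases r with _ | ⟨r1, rs⟩
        · simp [snocLast]
        · simp [snocLast]

theorem map_strip_snocLast (a : Char) (ha : PySem.Chars.isspace a = true) (X : List (List Char)) (hX : X ≠ []) :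
    (snocLast a X).map PySem.Chars.strip = X.map PySem.Chars.strip := by
  induction X with
  | nil => exact absurd rfl hX
  | cons h r ih =>
    rcases r with _ | ⟨r1, rs⟩
    · simp [snocLast, strip_snoc_space a ha]
    · simp only [snocLast, List.map_cons]
      rw [ih (by simp)]
      simp

theorem map_strip_mySplit_lstrip (l : List Char) :
    (mySplit ',' (PySem.Chars.lstrip l)).map PySem.Chars.strip
      = (mySplit ',' l).map PySem.Chars.strip := by
  induction l with
  | nil => rfl
  | cons a t ih =>
    by_cases ha : PySem.Chars.isspace a
    · have hac : a ≠ ',' := by rintro rfl; simp [PySem.Chars.isspace] at ha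
      have h1 : PySem.Chars.lstrip (a :: t) = PySem.Chars.lstrip t := by
        simp [PySem.Chars.lstrip, List.dropWhile_cons, ha]
      rw [h1, ih]
      simp only [mySplit, if_neg hac]
      rcases hh : mySplit ',' t with _ | ⟨h1, r⟩
      · exact absurd hh (mySplit_ne_nil _ t)
      · simp [strip_cons_space a ha]
    · simp [PySem.Chars.lstrip, List.dropWhile_cons, ha]

theorem map_strip_mySplit_rstrip (l : List Char) :
    (mySplit ',' (PySem.Chars.rstrip l)).map PySem.Chars.strip
      = (mySplit ',' l).map PySem.Chars.strip := by
  induction l using List.reverseRecOn with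
  | nil => rfl
  | append_singleton l a ih =>
    by_cases ha : PySem.Chars.isspace a
    · have hac : a ≠ ',' := by rintro rfl; simp [PySem.Chars.isspace] at ha
      have h1 : PySem.Chars.rstrip (l ++ [a]) = PySem.Chars.rstrip l := by
        simp [PySem.Chars.rstrip, List.dropWhile_cons, ha]
      rw [h1, ih, mySplit_snoc ',' a hac l,
          map_strip_snocLast a ha _ (mySplit_ne_nil _ l)]
    · have h1 : PySem.Chars.rstrip (l ++ [a]) = l ++ [a] := by
        simp [PySem.Chars.rstrip, List.dropWhile_cons, ha]
      rw [h1]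

theorem map_strip_mySplit_strip (l : List Char) :
    (mySplit ',' (PySem.Chars.strip l)).map PySem.Chars.strip
      = (mySplit ',' l).map PySem.Chars.strip := by
  rw [PySem.Chars.strip, map_strip_mySplit_rstrip, map_strip_mySplit_lstrip]

def tokS (tags : List String) (part : String) : List String :=
  let p := if PySem.Str.isIn "(" part && PySem.Str.isIn ")" part
           then PySem.Str.strip (PySem.List.pyGetD (pySplitStr part "(") 0 "")
           else part
  if p ≠ "" then tags ++ [p] else tags

def Tn (cs : List Char) : List String :=
  ((mySplit ',' cs).map PySem.Chars.strip).map String.ofList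

theorem Tn_strip (cs : List Char) : Tn (PySem.Chars.strip cs) = Tn cs := by
  unfold Tn; rw [map_strip_mySplit_strip]

theorem tokS_empty (tags : List String) : tokS tags "" = tags := by
  unfold tokS
  rw [show (PySem.Str.isIn "(" "" && PySem.Str.isIn ")" "") = false from by decide]
  simp

theorem strip_comp_ofList :
    PySem.Str.strip ∘ String.ofList = String.ofList ∘ PySem.Chars.strip := by
  funext u; simp [PySem.Str.strip]

theorem pySplit_comma_strip (x : String) :
    (pySplitStr x ",").map PySem.Str.strip = Tn x.toList := by
  unfold pySplitStr Tn
  rw [show (",".toList) = [','] from rfl, splitOn_single, List.map_map, strip_comp_ofList,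
      ← List.map_map]

theorem line_contrib (tags : List String) (l₀ : String) :
    (if PySem.Str.strip l₀ ≠ "" then
        List.foldl tokS tags ((pySplitStr (PySem.Str.strip l₀) ",").map PySem.Str.strip)
     else tags)
    = List.foldl tokS tags (Tn l₀.toList) := by
  have ht : (PySem.Str.strip l₀).toList = PySem.Chars.strip l₀.toList := by simp
  by_cases h : PySem.Str.strip l₀ = ""
  · rw [if_neg (by simp [h])]
    have hnil : PySem.Chars.strip l₀.toList = [] := by rw [← ht, h]; rfl
    have hT : Tn l₀.toList = [""] := by rw [← Tn_strip, hnil]; rfl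
    rw [hT, List.foldl_cons, List.foldl_nil, tokS_empty]
  · rw [if_pos h, pySplit_comma_strip, ht, Tn_strip]

theorem lenCond (p : String) : (p ≠ "" ∧ PySem.Str.len p > 0) ↔ p ≠ "" := by
  constructor
  · exact And.left
  · intro h
    refine ⟨h, ?_⟩
    have : p.toList ≠ [] := fun hn => h (String.toList_eq_nil_iff.mp hn)
    have : 0 < p.toList.length := List.length_pos_iff.mpr this
    simp only [PySem.Str.len, gt_iff_lt]
    exact_mod_cast this

-- ===== B-side scanner lemmas =====

def mySplit2 : List Char → List (List Char)
  | [] => [[]]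
  | a :: t =>
    if a = ',' ∨ a = '\n' then [] :: mySplit2 t
    else
      match mySplit2 t with
      | [] => [[a]]
      | h :: r => (a :: h) :: r

theorem mySplit2_eq (l : List Char) : mySplit2 l = mySplit ',' (l.map nl2c) := by
  induction l with
  | nil => rfl
  | cons a t ih =>
    by_cases hs : a = ',' ∨ a = '\n'
    · have hn : nl2c a = ',' := by rcases hs with h | h <;> simp [nl2c, h]
      simp [mySplit2, if_pos hs, hn, mySplit, ih]
    · push_neg at hs
      have hn : nl2c a = a := by simp [nl2c, hs.2]
      simp only [mySplit2, if_neg (by tauto : ¬(a = ',' ∨ a = '\n')), List.map_cons, hn,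
        mySplit, if_neg hs.1, ih]

theorem mySplit2_ne_nil (l : List Char) : mySplit2 l ≠ [] := by
  cases l with
  | nil => simp [mySplit2]
  | cons a t =>
    simp only [mySplit2]
    split
    · simp
    · split <;> simp_all

def consHead (buf : List Char) : List (List Char) → List (List Char)
  | [] => [buf]
  | h :: r => (buf ++ h) :: r

theorem scan_eq (cs : List Char) : ∀ (acc : List String) (buf : List Char),
    List.foldl pvStep (acc, buf) (cs ++ [','])
      = (List.foldl pvFin acc (consHead buf (mySplit2 cs)), []) := by
  induction cs with
  | nil =>
    intro acc buf
    simp [pvStep, mySplit2, consHead]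
  | cons a t ih =>
    intro acc buf
    by_cases hs : a = ',' ∨ a = '\n'
    · have h1 : pvStep (acc, buf) a = (pvFin acc buf, []) := by simp [pvStep, hs]
      rw [List.cons_append, List.foldl_cons, h1, ih]
      simp only [mySplit2, if_pos hs]
      rcases hh : mySplit2 t with _ | ⟨h2, r⟩
      · exact absurd hh (mySplit2_ne_nil t)
      · simp [consHead]
    · have h1 : pvStep (acc, buf) a = (acc, buf ++ [a]) := by simp [pvStep, hs]
      rw [List.cons_append, List.foldl_cons, h1, ih]
      simp only [mySplit2, if_neg hs]
      rcases hh : mySplit2 t with _ | ⟨h2, r⟩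
      · exact absurd hh (mySplit2_ne_nil t)
      · simp [consHead]

theorem infix_single (c : Char) (l : List Char) : [c] <:+: l ↔ c ∈ l := by
  constructor
  · intro h; exact h.subset (List.mem_singleton_self c)
  · intro h
    rcases List.mem_iff_append.mp h with ⟨s, t, rfl⟩
    exact ⟨s, t, by simp⟩

theorem isIn_single (c : Char) (u : List Char) :
    PySem.Str.isIn (String.ofList [c]) (String.ofList u) = true ↔ c ∈ u := by
  rw [PySem.Str.isIn_iff_infix]
  simp [infix_single]

theorem mySplit_head (c : Char) (l : List Char) (h1 : List Char) (r : List (List Char))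
    (hh : mySplit c l = h1 :: r) : h1 = l.takeWhile (fun x => x ≠ c) := by
  induction l generalizing h1 r with
  | nil => simp [mySplit] at hh; simp [hh.1]
  | cons a t ih =>
    by_cases hac : a = c
    · subst hac
      have hh2 : ([] : List Char) :: mySplit a t = h1 :: r := by simpa [mySplit] using hh
      injection hh2 with he _
      simp [← he]
    · simp only [mySplit, if_neg hac] at hh
      rcases hg : mySplit c t with _ | ⟨g1, s⟩
      · exact absurd hg (mySplit_ne_nil c t)
      · rw [hg] at hh
        simp only [List.cons.injEq] at hh
        rw [List.takeWhile_cons, if_pos (by simp [hac]), ← hh.1, ih g1 s hg]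

theorem cut_eq (t : List Char) :
    String.ofList (pvCut t)
      = (if PySem.Str.isIn "(" (String.ofList t) && PySem.Str.isIn ")" (String.ofList t)
         then PySem.Str.strip (PySem.List.pyGetD (pySplitStr (String.ofList t) "(") 0 "")
         else String.ofList t) := by
  have hin : (PySem.Str.isIn "(" (String.ofList t) && PySem.Str.isIn ")" (String.ofList t)) = true
      ↔ ('(' ∈ t ∧ ')' ∈ t) := by
    rw [Bool.and_eq_true]
    rw [show ("(" : String) = String.ofList ['('] from rfl,
        show (")" : String) = String.ofList [')'] from rfl]
    rw [isIn_single, isIn_single]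
  by_cases hp : '(' ∈ t ∧ ')' ∈ t
  · rw [pvCut, if_pos hp, if_pos (hin.mpr hp)]
    have hsplit : pySplitStr (String.ofList t) "(" = (mySplit '(' t).map String.ofList := by
      unfold pySplitStr
      rw [show (String.ofList t).toList = t from by simp,
          show ("(".toList) = ['('] from rfl, splitOn_single]
    rcases hh : mySplit '(' t with _ | ⟨h1, r⟩
    · exact absurd hh (mySplit_ne_nil _ t)
    · have hget : PySem.List.pyGetD (pySplitStr (String.ofList t) "(") 0 ""
          = String.ofList h1 := by
        rw [hsplit, hh]
        simp [PySem.List.pyGetD, PySem.List.pyGet?, PySem.List.pyIdx?]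
      rw [hget, mySplit_head '(' t h1 r hh]
      simp [PySem.Str.strip]
  · rw [pvCut, if_neg hp, if_neg (fun hc => hp (hin.mp hc))]

theorem pvFin_eq_tokS (tags : List String) (chunk : List Char) :
    pvFin tags chunk = tokS tags (String.ofList (PySem.Chars.strip chunk)) := by
  simp only [pvFin, tokS]
  rw [← cut_eq]
  by_cases h : pvCut (PySem.Chars.strip chunk) = []
  · rw [if_neg (by simpa using h), if_neg (by simp [h])]
  · rw [if_pos (by simpa using h), if_pos (by simp [h])]

theorem main_eq (s : String) : extract_tags_from_prompt_py s = extract_tags_from_prompt_py_alt s := by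
  have hbody : (fun (tags : List String) (part₀ : String) =>
      let part := if PySem.Str.isIn "(" part₀ && PySem.Str.isIn ")" part₀
                  then PySem.Str.strip (PySem.List.pyGetD (pySplitStr part₀ "(") 0 "")
                  else part₀
      if part ≠ "" ∧ PySem.Str.len part > 0 then tags ++ [part] else tags) = tokS := by
    funext tags p₀
    unfold tokS
    simp only [lenCond]
  have hA : extract_tags_from_prompt_py s
      = List.foldl tokS [] (((mySplit '\n' s.toList).map Tn).flatten) := by
    unfold extract_tags_from_prompt_py
    simp only [hbody]
    have houter : (fun (tags : List String) (line₀ : String) =>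
        if PySem.Str.strip line₀ ≠ "" then
          List.foldl tokS tags ((pySplitStr (PySem.Str.strip line₀) ",").map PySem.Str.strip)
        else tags) = fun tags l₀ => List.foldl tokS tags (Tn l₀.toList) :=
      funext fun tags => funext fun l₀ => line_contrib tags l₀
    rw [houter]
    rw [show pySplitStr s "\n" = (mySplit '\n' s.toList).map String.ofList from by
      unfold pySplitStr; rw [show ("\n".toList) = ['\n'] from rfl, splitOn_single]]
    rw [List.foldl_map, List.foldl_flatten, List.foldl_map]
    simp only [String.toList_ofList]
  have hB : extract_tags_from_prompt_py_alt s
      = List.foldl pvFin [] (mySplit2 s.toList) := by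
    unfold extract_tags_from_prompt_py_alt
    rw [show (s ++ ",").toList = s.toList ++ [','] from by simp, scan_eq]
    rcases hh : mySplit2 s.toList with _ | ⟨h1, r⟩
    · exact absurd hh (mySplit2_ne_nil s.toList)
    · simp [consHead]
  have hfin : pvFin = fun tags u => tokS tags (String.ofList (PySem.Chars.strip u)) :=
    funext fun tags => funext fun u => pvFin_eq_tokS tags u
  have hTn : Tn = fun u => (mySplit ',' u).map (fun v => String.ofList (PySem.Chars.strip v)) := by
    funext u
    simp [Tn, List.map_map, Function.comp]
  have hlist : (List.map (fun u => (mySplit ',' u).map (fun v => String.ofList (PySem.Chars.strip v))) (mySplit '\n' s.toList)).flatten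
      = List.map (fun u => String.ofList (PySem.Chars.strip u)) ((mySplit '\n' s.toList).flatMap (mySplit ',')) := by
    rw [List.flatMap_def, List.map_flatten, List.map_map]
    simp only [Function.comp_def]
  have hfold : List.foldl (fun tags u => tokS tags (String.ofList (PySem.Chars.strip u))) ([] : List String)
        ((mySplit '\n' s.toList).flatMap (mySplit ','))
      = List.foldl tokS []
          (((mySplit '\n' s.toList).flatMap (mySplit ',')).map (fun u => String.ofList (PySem.Chars.strip u))) :=
    List.foldl_map.symm
  rw [hA, hB, mySplit2_eq, mySplit_map_nl, hfin, hfold, hTn, hlist]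

-- ===== VERDICT (by name: the statement is the Claim_ definition above) =====
theorem extract_tags_from_prompt_py_spec : Claim_equal_extract_tags_from_prompt_py := by
  unfold Claim_equal_extract_tags_from_prompt_py
  intro prompt_text _
  unfold Spec_extract_tags_from_prompt_py
  exact main_eq prompt_text
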